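-- pv_equiv track=rewrite | github.com/mojtaba-eshghie/SolidityScopeReducer | main1.py | find_enclosing_elements
-- ===== SOURCE A (Python) =====
-- def find_enclosing_elements(solidity_code, start_line, end_line):
--     # Normalize line endings and split the code into lines
--     lines = solidity_code.replace('\r\n', '\n').split('\n')
--
--     # Initialize variables to keep track of contracts and functions
--     current_contract = None
--     current_function = None
--     enclosing_contract = None
--     enclosing_function = None
--     contract_start_line = float('-inf')
--     function_start_line = float('-inf')
--     function_end_line = float('inf')
--
--     # Flags to detect if the range spans across multiple functions
--     is_within_function = False
--     multiple_functions = False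
--
--     # Iterate over the lines of the code
--     for i, line in enumerate(lines):
--         # Check for contract declaration
--         if 'contract ' in line:
--             # Set the current contract
--             current_contract = line
--             contract_start_line = i + 1
--
--             # Reset function-related variables
--             current_function = None
--             function_start_line = float('inf')
--             function_end_line = float('inf')
--             is_within_function = False
--
--         # Check for function or constructor declaration
--         elif 'function ' in line or 'constructor' in line:
--             current_function = line
--             function_start_line = i + 1
--             is_within_function = False
--
--         # Check for the end of a function or constructor block
--         elif current_function and '{' in line:
--             # This is a simplified assumption that the '{' marks the end of the function signature
--             function_end_line = i + 1
--
--         # Check if the current line number is within the range of start_line and end_line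
--         if start_line <= i + 1 <= end_line:
--             if current_contract and contract_start_line <= i + 1:
--                 enclosing_contract = current_contract
--             if current_function and function_start_line <= i + 1 <= function_end_line:
--                 is_within_function = True
--                 enclosing_function = current_function
--             elif is_within_function and (i + 1 > function_end_line or '}' in line):
--                 # If the range spans outside the current function, reset enclosing_function
--                 is_within_function = False
--                 multiple_functions = True
--                 enclosing_function = None
--
--     # If the range spans multiple functions or is outside any function, reset enclosing_function to None
--     if multiple_functions or not is_within_function:
--         enclosing_function = None
--
--     return enclosing_contract, enclosing_function
-- ===== SOURCE B (Python) =====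
-- def _scan_states(lines):
--     # Pass 1: per line, record (line, was_a_declaration_line, current_contract,
--     # current_function, function_end_line) as of that line (None end = "not yet known").
--     cc = None
--     cf = None
--     fel = None
--     table = []
--     for i, line in enumerate(lines):
--         decl = False
--         if 'contract ' in line:
--             cc, cf, fel, decl = line, None, None, True
--         elif 'function ' in line or 'constructor' in line:
--             cf, decl = line, True
--         elif cf is not None and '{' in line:
--             fel = i + 1
--         table.append((line, decl, cc, cf, fel))
--     return table
--
--
-- def find_enclosing_elements(solidity_code, start_line, end_line):
--     lines = solidity_code.replace('\r\n', '\n').split('\n')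
--     table = _scan_states(lines)
--     # Pass 2: replay the enclosing/within-function flags over the recorded states.
--     ec = None
--     ef = None
--     iw = False
--     mf = False
--     for i, (line, decl, cc, cf, fel) in enumerate(table):
--         if decl:
--             iw = False
--         if start_line <= i + 1 <= end_line:
--             if cc is not None:
--                 ec = cc
--             if cf is not None and (fel is None or i + 1 <= fel):
--                 iw = True
--                 ef = cf
--             elif iw and ((fel is not None and i + 1 > fel) or '}' in line):
--                 iw = False
--                 mf = True
--                 ef = None
--     return (ec, None) if (mf or not iw) else (ec, ef)
-- ===== Notes on version B (the rewrite author's own statement) =====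
-- stated objective: alternative
-- what changed: Replaces A's single stateful sweep by two passes: a scan that records the parser state (current contract/function, declaration flag, function-end line) per line, then a replay of the enclosing/within-function flags over that table; the start-line comparisons and the float('inf') sentinels are dropped (the recorded state makes them redundant, end lines are Optional).
import Mathlib
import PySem

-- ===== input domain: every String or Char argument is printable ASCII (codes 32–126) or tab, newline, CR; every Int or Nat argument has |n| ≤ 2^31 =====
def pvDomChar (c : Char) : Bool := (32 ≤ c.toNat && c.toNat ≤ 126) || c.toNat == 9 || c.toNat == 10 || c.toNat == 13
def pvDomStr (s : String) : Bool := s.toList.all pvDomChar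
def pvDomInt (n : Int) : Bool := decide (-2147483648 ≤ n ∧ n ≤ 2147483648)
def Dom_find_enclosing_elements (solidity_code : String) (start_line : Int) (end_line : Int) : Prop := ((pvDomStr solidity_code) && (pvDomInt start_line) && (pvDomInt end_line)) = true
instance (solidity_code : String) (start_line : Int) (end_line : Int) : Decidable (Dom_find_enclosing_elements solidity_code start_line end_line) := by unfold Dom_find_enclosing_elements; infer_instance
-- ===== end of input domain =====

-- B replaces A's single stateful sweep by two passes — a scan recording the parser state per
-- line, then a replay of the range flags over that table — dropping the start-line comparisons
-- and the ±infinity sentinels (objective: alternative decomposition, same cost).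

-- ===== PORT A =====
-- A compares float('-inf')/float('inf') only with ints; XInt models {-∞, +∞, n : Int} with
-- exact comparisons, so the port is exact on these values.
inductive XInt
  | ninf
  | pinf
  | fin (n : Int)
deriving DecidableEq

def XInt.leI : XInt → Int → Bool      -- self ≤ i
  | .ninf, _ => true
  | .pinf, _ => false
  | .fin n, i => decide (n ≤ i)

def XInt.geI : XInt → Int → Bool      -- i ≤ self
  | .ninf, _ => false
  | .pinf, _ => true
  | .fin n, i => decide (i ≤ n)

def XInt.ltI : XInt → Int → Bool      -- self < i
  | .ninf, _ => true
  | .pinf, _ => false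
  | .fin n, i => decide (n < i)

structure StA where
  cc : Option String     -- current_contract
  csl : XInt             -- contract_start_line
  cf : Option String     -- current_function
  fsl : XInt             -- function_start_line
  fel : XInt             -- function_end_line
  ec : Option String     -- enclosing_contract
  ef : Option String     -- enclosing_function
  iw : Bool              -- is_within_function
  mf : Bool              -- multiple_functions

-- A's loop body, step for step, as its two sequential blocks:
-- the declaration `if/elif` chain …
def machineA (i : Int) (line : String) (s : StA) : StA :=
  if PySem.Str.isIn "contract " line then
    { s with cc := some line, csl := .fin (i+1), cf := none, fsl := .pinf, fel := .pinf, iw := false }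
  else if PySem.Str.isIn "function " line || PySem.Str.isIn "constructor" line then
    { s with cf := some line, fsl := .fin (i+1), iw := false }
  else if s.cf.isSome && PySem.Str.isIn "{" line then
    { s with fel := .fin (i+1) }
  else s

-- … then the `if start_line <= i + 1 <= end_line` block
def rangeA (sl el i : Int) (line : String) (s : StA) : StA :=
  if decide (sl ≤ i+1) && decide (i+1 ≤ el) then
    let s := if s.cc.isSome && s.csl.leI (i+1) then { s with ec := s.cc } else s
    if s.cf.isSome && s.fsl.leI (i+1) && s.fel.geI (i+1) then
      { s with iw := true, ef := s.cf }
    else if s.iw && (s.fel.ltI (i+1) || PySem.Str.isIn "}" line) then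
      { s with iw := false, mf := true, ef := none }
    else s
  else s

def stepA (sl el i : Int) (line : String) (s : StA) : StA :=
  rangeA sl el i line (machineA i line s)

def loopA (sl el : Int) : List String → Int → StA → StA
  | [], _, s => s
  | line :: rest, i, s => loopA sl el rest (i+1) (stepA sl el i line s)

def find_enclosing_elements (solidity_code : String) (start_line : Int) (end_line : Int) : Option String × Option String :=
  let lines := (PySem.Str.split? (PySem.Str.replace solidity_code "\r\n" "\n") "\n").getD []  -- sep "\n" ≠ "", so split? is `some`: exact for .split('\n')
  let s := loopA start_line end_line lines 0 ⟨none, .ninf, none, .ninf, .pinf, none, none, false, false⟩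
  let ef := if s.mf || !s.iw then none else s.ef
  (s.ec, ef)

-- ===== PORT B =====
structure RecB where
  line : String
  decl : Bool            -- was this a contract/function/constructor declaration line
  cc : Option String     -- current_contract as of this line
  cf : Option String     -- current_function as of this line
  fel : Option Int       -- function_end_line as of this line (none = not yet seen)

-- Source B `fel is None or i <= fel`
def leFel (i : Int) : Option Int → Bool
  | none => true
  | some n => decide (i ≤ n)

-- Source B `fel is not None and i > fel`
def gtFel (i : Int) : Option Int → Bool
  | none => false
  | some n => decide (n < i)

-- pass 1 (Source B _scan_states): record the parser state per line
def scanB : List String → Int → Option String → Option String → Option Int → List RecB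
  | [], _, _, _, _ => []
  | line :: rest, i, cc, cf, fel =>
    if PySem.Str.isIn "contract " line then
      ⟨line, true, some line, none, none⟩ :: scanB rest (i+1) (some line) none none
    else if PySem.Str.isIn "function " line || PySem.Str.isIn "constructor" line then
      ⟨line, true, cc, some line, fel⟩ :: scanB rest (i+1) cc (some line) fel
    else if cf.isSome && PySem.Str.isIn "{" line then
      ⟨line, false, cc, cf, some (i+1)⟩ :: scanB rest (i+1) cc cf (some (i+1))
    else
      ⟨line, false, cc, cf, fel⟩ :: scanB rest (i+1) cc cf fel

structure StB where
  ec : Option String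
  ef : Option String
  iw : Bool
  mf : Bool

-- pass 2 body (Source B loop body): the `if decl` reset, then the range block
def rangeB (sl el i : Int) (line : String) (cc cf : Option String) (fel : Option Int) (f : StB) : StB :=
  if decide (sl ≤ i+1) && decide (i+1 ≤ el) then
    let f := if cc.isSome then { f with ec := cc } else f
    if cf.isSome && leFel (i+1) fel then
      { f with iw := true, ef := cf }
    else if f.iw && (gtFel (i+1) fel || PySem.Str.isIn "}" line) then
      { f with iw := false, mf := true, ef := none }
    else f
  else f

def stepB (sl el i : Int) (r : RecB) (f : StB) : StB :=
  rangeB sl el i r.line r.cc r.cf r.fel (if r.decl then { f with iw := false } else f)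

def loopB (sl el : Int) : List RecB → Int → StB → StB
  | [], _, f => f
  | r :: rest, i, f => loopB sl el rest (i+1) (stepB sl el i r f)

def find_enclosing_elements_alt (solidity_code : String) (start_line : Int) (end_line : Int) : Option String × Option String :=
  let lines := (PySem.Str.split? (PySem.Str.replace solidity_code "\r\n" "\n") "\n").getD []  -- sep "\n" ≠ "", so split? is `some`: exact for .split('\n')
  let table := scanB lines 0 none none none
  let f := loopB start_line end_line table 0 ⟨none, none, false, false⟩
  if f.mf || !f.iw then (f.ec, none) else (f.ec, f.ef)

-- ===== PRECONDITION & SPEC =====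
def Spec_find_enclosing_elements (solidity_code : String) (start_line : Int) (end_line : Int) (out : Option String × Option String) : Prop := out = find_enclosing_elements_alt solidity_code start_line end_line
instance (solidity_code : String) (start_line : Int) (end_line : Int) (out : Option String × Option String) : Decidable (Spec_find_enclosing_elements solidity_code start_line end_line out) := by unfold Spec_find_enclosing_elements; infer_instance

-- ===== CLAIM (what is proved, stated in full; the proofs are below) =====
def Claim_equal_find_enclosing_elements : Prop := ∀ (solidity_code : String) (start_line : Int) (end_line : Int), Dom_find_enclosing_elements solidity_code start_line end_line → Spec_find_enclosing_elements solidity_code start_line end_line (find_enclosing_elements solidity_code start_line end_line)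

-- ===== LEMMAS AND PROOFS =====
def XInt.ofOpt : Option Int → XInt
  | none => .pinf
  | some n => .fin n

def projFB (s : StA) : StB := ⟨s.ec, s.ef, s.iw, s.mf⟩

lemma XInt.leI_succ (a : XInt) (i : Int) (h : a.leI i = true) : a.leI (i+1) = true := by
  cases a <;> simp_all [XInt.leI] <;> omega

-- The range block of A equals B's range block componentwise, given the start-line invariant.
lemma range_sim (sl el i : Int) (line : String) (cc cf : Option String) (csl fsl : XInt)
    (felo : Option Int) (ec ef : Option String) (iw mf : Bool)
    (hcc : cc.isSome = true → csl.leI (i+1) = true)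
    (hcf : cf.isSome = true → fsl.leI (i+1) = true) :
    rangeA sl el i line ⟨cc, csl, cf, fsl, XInt.ofOpt felo, ec, ef, iw, mf⟩
      = ⟨cc, csl, cf, fsl, XInt.ofOpt felo,
         (rangeB sl el i line cc cf felo ⟨ec, ef, iw, mf⟩).ec,
         (rangeB sl el i line cc cf felo ⟨ec, ef, iw, mf⟩).ef,
         (rangeB sl el i line cc cf felo ⟨ec, ef, iw, mf⟩).iw,
         (rangeB sl el i line cc cf felo ⟨ec, ef, iw, mf⟩).mf⟩ := by
  cases cc <;> cases cf <;> cases felo <;>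
    simp_all only [rangeA, rangeB, XInt.ofOpt, XInt.geI, XInt.ltI, leFel, gtFel,
      Option.isSome_some, Option.isSome_none, Bool.true_and, Bool.false_and, Bool.and_false,
      forall_const, IsEmpty.forall_iff] <;>
    split_ifs <;> (try simp_all) <;> omega

-- Main simulation: running A's loop from a machine state whose start lines are already
-- behind the next index equals scanning the rest and replaying the flags over the table.
lemma sim : ∀ (lines : List String) (sl el i : Int)
    (cc cf : Option String) (csl fsl : XInt) (felo : Option Int)
    (ec ef : Option String) (iw mf : Bool),
    (cc.isSome = true → csl.leI i = true) →
    (cf.isSome = true → fsl.leI i = true) →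
    projFB (loopA sl el lines i ⟨cc, csl, cf, fsl, XInt.ofOpt felo, ec, ef, iw, mf⟩)
      = loopB sl el (scanB lines i cc cf felo) i ⟨ec, ef, iw, mf⟩ := by
  intro lines
  induction lines with
  | nil => intros; rfl
  | cons line rest ih =>
    intro sl el i cc cf csl fsl felo ec ef iw mf hcc hcf
    have hcc' : cc.isSome = true → csl.leI (i+1) = true := fun h => XInt.leI_succ _ _ (hcc h)
    have hcf' : cf.isSome = true → fsl.leI (i+1) = true := fun h => XInt.leI_succ _ _ (hcf h)
    simp only [loopA, scanB, stepA]
    by_cases hc : PySem.Str.isIn "contract " line = true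
    · -- contract declaration line
      simp only [hc, ↓reduceIte, loopB, stepB, machineA]
      rw [show (XInt.pinf : XInt) = XInt.ofOpt none from rfl,
        range_sim sl el i line (some line) none (.fin (i+1)) (XInt.ofOpt none) none ec ef false mf
          (fun _ => by simp [XInt.leI]) (fun h => by simp at h)]
      exact ih sl el (i+1) (some line) none (.fin (i+1)) (XInt.ofOpt none) none _ _ _ _
        (fun _ => by simp [XInt.leI]) (fun h => by simp at h)
    · by_cases hf : (PySem.Str.isIn "function " line || PySem.Str.isIn "constructor" line) = true
      · -- function/constructor declaration line
        simp only [hc, hf, Bool.false_eq_true, ↓reduceIte, loopB, stepB, machineA]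
        rw [range_sim sl el i line cc (some line) csl (.fin (i+1)) felo ec ef false mf
            hcc' (fun _ => by simp [XInt.leI])]
        exact ih sl el (i+1) cc (some line) csl (.fin (i+1)) felo _ _ _ _
          hcc' (fun _ => by simp [XInt.leI])
      · by_cases hb : (cf.isSome && PySem.Str.isIn "{" line) = true
        · -- '{' closing a function signature
          simp only [hc, hf, hb, Bool.false_eq_true, ↓reduceIte, loopB, stepB, machineA]
          rw [show (XInt.fin (i+1) : XInt) = XInt.ofOpt (some (i+1)) from rfl,
            range_sim sl el i line cc cf csl fsl (some (i+1)) ec ef iw mf hcc' hcf']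
          exact ih sl el (i+1) cc cf csl fsl (some (i+1)) _ _ _ _ hcc' hcf'
        · -- plain line
          simp only [hc, hf, hb, Bool.false_eq_true, ↓reduceIte, loopB, stepB, machineA]
          rw [range_sim sl el i line cc cf csl fsl felo ec ef iw mf hcc' hcf']
          exact ih sl el (i+1) cc cf csl fsl felo _ _ _ _ hcc' hcf'

-- ===== VERDICT (by name: the statement is the Claim_ definition above) =====
theorem find_enclosing_elements_spec : Claim_equal_find_enclosing_elements := by
  intro code sl el _
  show _ = _
  unfold find_enclosing_elements find_enclosing_elements_alt
  have h := sim ((PySem.Str.split? (PySem.Str.replace code "\r\n" "\n") "\n").getD []) sl el 0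
      none none .ninf .ninf none none none false false (by simp) (by simp)
  simp only [projFB, XInt.ofOpt] at h
  rw [show (StA.mk none .ninf none .ninf .pinf none none false false) =
      ⟨none, .ninf, none, .ninf, XInt.ofOpt none, none, none, false, false⟩ from rfl] at *
  have hec := congrArg StB.ec h
  have hef := congrArg StB.ef h
  have hiw := congrArg StB.iw h
  have hmf := congrArg StB.mf h
  simp only [hec, hef, hiw, hmf]
  split_ifs <;> simp_all
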